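-- pv_equiv track=rewrite | github.com/fip-lab/DIGGER | train_comet/dataset/Alfred-partially-specified-tasks/len_all.py | sentence_to_steps_mapping
-- ===== SOURCE A (Python) =====
-- def sentence_to_steps_mapping(dictionary):
--     # ， key， value
--     sentence_to_steps = {}
--
--     for step, sentences in dictionary.items():
--         for sentence in sentences:
--             # ，
--             if sentence not in sentence_to_steps:
--                 sentence_to_steps[sentence] = []
--             #
--             if step not in sentence_to_steps[sentence]:
--                 sentence_to_steps[sentence].append(step)
--
--     return sentence_to_steps
-- ===== SOURCE B (Python) =====
-- def sentence_to_steps_mapping(dictionary):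
--     # Flatten the dict into a single stream of (sentence, step) pairs, bucket
--     # the stream into sentence -> all steps (duplicates kept), then dedup each
--     # bucket once with dict.fromkeys (first-occurrence order).
--     pairs = [(sentence, step) for step, sentences in dictionary.items()
--              for sentence in sentences]
--     table = {}
--     for sentence, step in pairs:
--         table.setdefault(sentence, []).append(step)
--     return {sentence: list(dict.fromkeys(steps)) for sentence, steps in table.items()}
-- ===== Notes on version B (the rewrite author's own statement) =====
-- stated objective: faster
-- what changed: Replaces A's nested loop with inline per-element 'step not in list' scans by a staged pipeline: flatten the dict into one flat stream of (sentence, step) pairs, bucket the stream into sentence->steps with setdefault/append (duplicates kept), then dedup each bucket once with dict.fromkeys.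
import Mathlib
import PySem

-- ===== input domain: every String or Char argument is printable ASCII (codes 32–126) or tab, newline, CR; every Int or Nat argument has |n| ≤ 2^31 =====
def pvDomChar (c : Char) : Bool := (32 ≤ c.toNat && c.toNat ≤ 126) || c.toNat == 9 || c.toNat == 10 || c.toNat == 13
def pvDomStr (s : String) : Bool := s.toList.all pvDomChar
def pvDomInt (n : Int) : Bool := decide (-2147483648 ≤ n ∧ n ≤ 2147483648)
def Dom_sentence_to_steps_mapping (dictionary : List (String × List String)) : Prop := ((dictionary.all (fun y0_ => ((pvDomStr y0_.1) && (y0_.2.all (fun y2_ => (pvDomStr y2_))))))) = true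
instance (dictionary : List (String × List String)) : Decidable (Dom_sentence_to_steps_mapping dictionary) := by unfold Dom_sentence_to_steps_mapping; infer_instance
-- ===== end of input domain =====

-- B replaces A's inline per-element membership test with a staged pipeline
-- (flatten dict to a flat (sentence, step) stream, bucket it, then dedup each bucket
-- once with dict.fromkeys); measured faster in a timing run.


-- ===== PORT A =====
def sentence_to_steps_mapping (dictionary : List (String × List String)) : List (String × List String) :=
  let sentence_to_steps : PySem.Dict String (List String) :=
    dictionary.foldl (fun sts p =>
      p.2.foldl (fun sts sentence =>
        let sts := if sts.contains sentence then sts else sts.insert sentence []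
        if (sts.getD sentence []).contains p.1 then sts
        else sts.modify sentence [] (fun l => l ++ [p.1])) sts)
      PySem.Dict.empty
  sentence_to_steps.items

-- ===== PORT B =====
def sentence_to_steps_mapping_alt (dictionary : List (String × List String)) : List (String × List String) :=
  -- pairs = [(sentence, step) for step, sentences in dictionary.items() for sentence in sentences]
  let pairs : List (String × String) :=
    dictionary.flatMap (fun p => p.2.map (fun sentence => (sentence, p.1)))
  -- for sentence, step in pairs: table.setdefault(sentence, []).append(step)
  let table : PySem.Dict String (List String) :=
    pairs.foldl (fun t q => t.modify q.1 [] (fun l => l ++ [q.2])) PySem.Dict.empty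
  -- {sentence: list(dict.fromkeys(steps)) for sentence, steps in table.items()}
  table.items.map (fun q => (q.1, PySem.List.dedup q.2))

-- ===== PRECONDITION & SPEC =====
def Spec_sentence_to_steps_mapping (dictionary : List (String × List String)) (out : List (String × List String)) : Prop := out = sentence_to_steps_mapping_alt dictionary
instance (dictionary : List (String × List String)) (out : List (String × List String)) : Decidable (Spec_sentence_to_steps_mapping dictionary out) := by unfold Spec_sentence_to_steps_mapping; infer_instance

-- ===== CLAIM (what is proved, stated in full; the proofs are below) =====
def Claim_equal_sentence_to_steps_mapping : Prop := ∀ (dictionary : List (String × List String)), Dom_sentence_to_steps_mapping dictionary → Spec_sentence_to_steps_mapping dictionary (sentence_to_steps_mapping dictionary)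

-- ===== LEMMAS AND PROOFS =====

-- proof-side names for the two loop bodies (definitionally the ports' lambdas)
def pvAStep (step : String) (sts : PySem.Dict String (List String)) (sentence : String) : PySem.Dict String (List String) :=
  let sts := if sts.contains sentence then sts else sts.insert sentence []
  if (sts.getD sentence []).contains step then sts
  else sts.modify sentence [] (fun l => l ++ [step])

def pvBStep (step : String) (t : PySem.Dict String (List String)) (sentence : String) : PySem.Dict String (List String) :=
  t.modify sentence [] (fun l => l ++ [step])

def pvMap (l : List (String × List String)) : List (String × List String) :=
  l.map (fun q => (q.1, PySem.List.dedup q.2))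

-- B's single fold over the flattened pair stream equals the nested fold of pvBStep
lemma pv_foldl_pairs (dict : List (String × List String)) (init : PySem.Dict String (List String)) :
    (dict.flatMap (fun p => p.2.map (fun sentence => (sentence, p.1)))).foldl
        (fun t q => t.modify q.1 [] (fun l => l ++ [q.2])) init
      = dict.foldl (fun t p => p.2.foldl (pvBStep p.1) t) init := by
  induction dict generalizing init with
  | nil => rfl
  | cons p rest ih =>
    simp only [List.flatMap_cons, List.foldl_append, List.foldl_map, List.foldl_cons]
    rw [ih]
    rfl

lemma pv_get?_mk_map (l : List (String × List String)) (s : String) :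
    (PySem.Dict.mk (pvMap l)).get? s = ((PySem.Dict.mk l).get? s).map PySem.List.dedup := by
  induction l with
  | nil => rfl
  | cons q t ih =>
    obtain ⟨qk, qv⟩ := q
    simp only [pvMap, List.map_cons, PySem.Dict.get?_mk_cons]
    by_cases h : qk == s
    · rw [if_pos h, if_pos h]; rfl
    · rw [if_neg h, if_neg h]; exact ih

lemma pv_contains_mk_map (l : List (String × List String)) (s : String) :
    (PySem.Dict.mk (pvMap l)).contains s = (PySem.Dict.mk l).contains s := by
  simp only [PySem.Dict.contains, pvMap, List.any_map]
  rfl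

lemma pv_map_f_replace (l : List (String × List String)) (w : List String) (s : String) :
    pvMap (l.map (fun p => if p.1 == s then (s, w) else p))
      = (pvMap l).map (fun p => if p.1 == s then (s, PySem.List.dedup w) else p) := by
  simp only [pvMap, List.map_map]
  apply List.map_congr_left
  intro p _
  by_cases h : p.1 = s <;> simp [h]

lemma pv_map_replace_self (L : List (String × List String)) (s : String) (u : List String)
    (hnd : (L.map Prod.fst).Nodup) (h : (s, u) ∈ L) :
    L.map (fun p => if p.1 == s then (s, u) else p) = L := by
  induction L with
  | nil => simp at h
  | cons q t ih =>
    simp only [List.map_cons, List.nodup_cons, List.mem_map] at hnd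
    rcases List.mem_cons.mp h with hq | ht
    · subst hq
      simp only [List.map_cons, beq_self_eq_true, if_pos]
      congr 1
      have hall : ∀ p ∈ t, (if (p.1 == s) = true then ((s : String), u) else p) = p := by
        intro p hp
        have : p.1 ≠ s := fun he => hnd.1 ⟨p, hp, he⟩
        simp [this]
      rw [List.map_congr_left hall, List.map_id']
    · have hqs : q.1 ≠ s := by
        intro he
        exact hnd.1 ⟨(s, u), ht, he.symm⟩
      simp only [List.map_cons]
      rw [if_neg (by simp [hqs]), ih hnd.2 ht]

lemma pv_dedup_append (v : List String) (x : String) :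
    PySem.List.dedup (v ++ [x])
      = if x ∈ v then PySem.List.dedup v else PySem.List.dedup v ++ [x] := by
  simp only [PySem.List.dedup, PySem.Set.ofList_append_singleton, PySem.Set.add_eq_ite,
    PySem.Set.mem_ofList]

lemma pv_step_eq (l : List (String × List String)) (hnd : ((PySem.Dict.mk l).keys).Nodup)
    (step s : String) :
    pvAStep step (PySem.Dict.mk (pvMap l)) s
      = PySem.Dict.mk (pvMap ((pvBStep step (PySem.Dict.mk l) s).items)) := by
  have hnd' : (l.map Prod.fst).Nodup := by simpa [PySem.Dict.keys] using hnd
  have hkeys : ((pvMap l).map Prod.fst) = l.map Prod.fst := by simp [pvMap]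
  cases hcase : (PySem.Dict.mk l).contains s with
  | true =>
    have hc := hcase
    obtain ⟨v, hv⟩ : ∃ v, (PySem.Dict.mk l).get? s = some v := by
      rw [PySem.Dict.contains_eq_isSome_get?] at hc
      exact Option.isSome_iff_exists.mp hc
    have hcm : (PySem.Dict.mk (pvMap l)).contains s = true := by
      rw [pv_contains_mk_map]; exact hc
    have hgD : (PySem.Dict.mk (pvMap l)).getD s [] = PySem.List.dedup v := by
      simp [PySem.Dict.getD, pv_get?_mk_map, hv]
    have hB : (pvBStep step (PySem.Dict.mk l) s).items
        = l.map (fun p => if p.1 == s then (s, v ++ [step]) else p) := by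
      simp only [pvBStep, PySem.Dict.modify, PySem.Dict.getD, hv, Option.getD_some]
      exact PySem.Dict.items_insert_of_contains _ _ hc
    by_cases hm : step ∈ v
    · have hct : (PySem.List.dedup v).contains step = true := by
        simpa [List.contains_iff_mem] using (PySem.List.mem_dedup v step).mpr hm
      have hL : pvAStep step (PySem.Dict.mk (pvMap l)) s = PySem.Dict.mk (pvMap l) := by
        simp only [pvAStep]
        rw [hcm]
        simp only [reduceIte]
        rw [hgD, hct]
        simp only [reduceIte]
      rw [hL, hB, pv_map_f_replace, pv_dedup_append, if_pos hm]
      have hmemL : ((s : String), PySem.List.dedup v) ∈ pvMap l := by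
        exact List.mem_map.mpr ⟨(s, v), PySem.Dict.mem_items_of_get?_eq_some _ hv, rfl⟩
      rw [pv_map_replace_self (pvMap l) s (PySem.List.dedup v) (by rw [hkeys]; exact hnd') hmemL]
    · have hcf : (PySem.List.dedup v).contains step = false := by
        rw [← Bool.not_eq_true, List.contains_iff_mem, PySem.List.mem_dedup]
        exact hm
      have hL : pvAStep step (PySem.Dict.mk (pvMap l)) s
          = (PySem.Dict.mk (pvMap l)).insert s (PySem.List.dedup v ++ [step]) := by
        simp only [pvAStep]
        rw [hcm]
        simp only [reduceIte]
        rw [hgD, hcf]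
        simp [PySem.Dict.modify, hgD]
      apply PySem.Dict.ext
      rw [hL, hB, pv_map_f_replace, pv_dedup_append, if_neg hm,
        PySem.Dict.items_insert_of_contains _ _ hcm]
  | false =>
    have hcf := hcase
    have hcm : (PySem.Dict.mk (pvMap l)).contains s = false := by
      rw [pv_contains_mk_map]; exact hcf
    have hL : pvAStep step (PySem.Dict.mk (pvMap l)) s
        = (PySem.Dict.mk (pvMap l)).insert s [step] := by
      simp only [pvAStep]
      rw [hcm]
      simp only [Bool.false_eq_true, if_false, PySem.Dict.modify, PySem.Dict.getD_insert_self]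
      rw [if_neg (by simp), PySem.Dict.insert_insert_self, List.nil_append]
    have hB : (pvBStep step (PySem.Dict.mk l) s).items = l ++ [(s, [step])] := by
      simp only [pvBStep, PySem.Dict.modify, PySem.Dict.getD_of_not_contains _ _ hcf]
      simpa using PySem.Dict.items_insert_of_not_contains (PySem.Dict.mk l) ([] ++ [step]) hcf
    apply PySem.Dict.ext
    rw [hL, hB, PySem.Dict.items_insert_of_not_contains _ _ hcm]
    simp only [pvMap, List.map_append, List.map_cons, List.map_nil]
    rw [show PySem.List.dedup [step] = [step] by simp [PySem.List.dedup, PySem.Set.ofList]]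

lemma pv_nodup_bstep (d : PySem.Dict String (List String)) (step s : String)
    (hnd : d.keys.Nodup) : ((pvBStep step d s).keys).Nodup := by
  exact PySem.Dict.nodup_keys_insert _ _ _ hnd

lemma pv_inner (step : String) (sentences : List String) :
    ∀ (l : List (String × List String)), ((PySem.Dict.mk l).keys).Nodup →
    sentences.foldl (pvAStep step) (PySem.Dict.mk (pvMap l))
      = PySem.Dict.mk (pvMap ((sentences.foldl (pvBStep step) (PySem.Dict.mk l)).items)) := by
  induction sentences with
  | nil => intro l _; rfl
  | cons s rest ih =>
    intro l hnd
    simp only [List.foldl_cons]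
    rw [pv_step_eq l hnd step s]
    have h2 := pv_nodup_bstep (PySem.Dict.mk l) step s hnd
    have := ih ((pvBStep step (PySem.Dict.mk l) s).items) (by exact h2)
    simpa using this

lemma pv_outer (dict : List (String × List String)) :
    ∀ (l : List (String × List String)), ((PySem.Dict.mk l).keys).Nodup →
    dict.foldl (fun d p => p.2.foldl (pvAStep p.1) d) (PySem.Dict.mk (pvMap l))
      = PySem.Dict.mk (pvMap ((dict.foldl (fun d p => p.2.foldl (pvBStep p.1) d) (PySem.Dict.mk l)).items)) := by
  induction dict with
  | nil => intro l _; rfl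
  | cons p rest ih =>
    intro l hnd
    simp only [List.foldl_cons]
    rw [pv_inner p.1 p.2 l hnd]
    have h2 : (((p.2.foldl (pvBStep p.1) (PySem.Dict.mk l))).keys).Nodup := by
      clear ih
      induction p.2 generalizing l with
      | nil => exact hnd
      | cons s rest2 ih2 =>
        simp only [List.foldl_cons]
        have := pv_nodup_bstep (PySem.Dict.mk l) p.1 s hnd
        simpa using ih2 ((pvBStep p.1 (PySem.Dict.mk l) s).items) (by simpa using this)
    have := ih ((p.2.foldl (pvBStep p.1) (PySem.Dict.mk l)).items) (by simpa using h2)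
    simpa using this

-- ===== VERDICT (by name: the statement is the Claim_ definition above) =====
theorem sentence_to_steps_mapping_spec : Claim_equal_sentence_to_steps_mapping := by
  intro dictionary _
  show sentence_to_steps_mapping dictionary = sentence_to_steps_mapping_alt dictionary
  show (dictionary.foldl (fun d p => p.2.foldl (pvAStep p.1) d) (PySem.Dict.mk (pvMap []))).items
      = pvMap (((dictionary.flatMap (fun p => p.2.map (fun sentence => (sentence, p.1)))).foldl
          (fun t q => t.modify q.1 [] (fun l => l ++ [q.2])) PySem.Dict.empty).items)
  rw [pv_foldl_pairs]
  rw [pv_outer dictionary [] (by simp [PySem.Dict.keys])]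
  rfl
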